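-- pv_equiv track=rewrite | github.com/natustx/toolhub | src/toolhub/crawler/website.py | is_doc_page
-- ===== SOURCE A (Python) =====
-- def is_doc_page(url: str) -> bool:
--     """Check if URL looks like a documentation page."""
--     url_lower = url.lower()
--
--     # Skip non-doc URLs
--     skip_patterns = [
--         "/blog/",
--         "/news/",
--         "/press/",
--         "/about/",
--         "/contact/",
--         "/login",
--         "/signup",
--         "/register",
--         "/account/",
--         "/cart",
--         "/checkout",
--         "/search",
--         ".pdf",
--         ".zip",
--         ".png",
--         ".jpg",
--         ".gif",
--         ".svg",
--         ".css",
--         ".js",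
--     ]
--     for pattern in skip_patterns:
--         if pattern in url_lower:
--             return False
--
--     return True
-- ===== SOURCE B (Python) =====
-- def is_doc_page(url: str) -> bool:
--     """Check if URL looks like a documentation page."""
--     low = url.lower()
--
--     skip_patterns = (
--         "/blog/", "/news/", "/press/", "/about/", "/contact/",
--         "/login", "/signup", "/register", "/account/", "/cart",
--         "/checkout", "/search",
--         ".pdf", ".zip", ".png", ".jpg", ".gif", ".svg", ".css", ".js",
--     )
--     # Position-major scan: walk the URL once; at each position test whether
--     # any skip pattern starts there (instead of one full substring search
--     # per pattern with early return).
--     for i in range(len(low)):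
--         for p in skip_patterns:
--             if low.startswith(p, i):
--                 return False
--     return True
-- ===== Notes on version B (the rewrite author's own statement) =====
-- stated objective: alternative
-- what changed: B replaces A's pattern-major loop (one full substring scan of the URL per pattern, early return) by a single position-major scan of the lowercased URL that at each index tests whether any skip pattern starts there.
import Mathlib
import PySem

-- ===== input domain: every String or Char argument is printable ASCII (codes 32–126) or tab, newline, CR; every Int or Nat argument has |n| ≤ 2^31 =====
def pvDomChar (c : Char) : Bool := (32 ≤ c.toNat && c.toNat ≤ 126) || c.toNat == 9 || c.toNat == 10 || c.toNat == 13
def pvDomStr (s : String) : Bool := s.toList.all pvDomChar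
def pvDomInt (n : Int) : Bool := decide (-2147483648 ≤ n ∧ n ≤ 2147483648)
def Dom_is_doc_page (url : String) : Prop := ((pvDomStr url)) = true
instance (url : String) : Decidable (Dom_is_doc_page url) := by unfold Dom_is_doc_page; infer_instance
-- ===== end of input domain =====

-- B replaces A's pattern-major substring scans by a single position-major scan of the
-- lowercased URL (alternative decomposition, same cost; return value is identical).


-- ===== PORT A =====
-- the literal skip-pattern list (identical in A and B)
def skipPatternsA : List String :=
  ["/blog/", "/news/", "/press/", "/about/", "/contact/", "/login", "/signup",
   "/register", "/account/", "/cart", "/checkout", "/search",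
   ".pdf", ".zip", ".png", ".jpg", ".gif", ".svg", ".css", ".js"]

-- 'for pattern in skip_patterns: if pattern in url_lower: return False; return True'
def is_doc_page (url : String) : Bool :=
  let url_lower := PySem.Str.lower url
  !(skipPatternsA.any (fun pattern => PySem.Str.isIn pattern url_lower))

-- ===== PORT B =====
-- 'for i in range(len(low)): for p in skip_patterns: if low.startswith(p, i): return False; return True'
-- low.startswith(p, i) with 0 ≤ i ≤ len(low) is exactly 'p is a prefix of low[i:]',
-- ported as PySem.Chars.startswith ((lowered list).drop i) p.toList.
def is_doc_page_alt (url : String) : Bool :=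
  let low := (PySem.Str.lower url).toList
  !((List.range low.length).any (fun i =>
      skipPatternsA.any (fun p => PySem.Chars.startswith (low.drop i) p.toList)))

-- ===== PRECONDITION & SPEC =====
def Spec_is_doc_page (url : String) (out : Bool) : Prop := out = is_doc_page_alt url
instance (url : String) (out : Bool) : Decidable (Spec_is_doc_page url out) := by unfold Spec_is_doc_page; infer_instance

-- ===== CLAIM (what is proved, stated in full; the proofs are below) =====
def Claim_equal_is_doc_page : Prop := ∀ (url : String), Dom_is_doc_page url → Spec_is_doc_page url (is_doc_page url)

-- ===== LEMMAS AND PROOFS =====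

-- For a nonempty pattern, 'p in cs' holds iff p starts at some index < cs.length.
theorem isIn_iff_exists_startswith (p cs : List Char) (hp : p ≠ []) :
    PySem.Chars.isIn p cs = true ↔ ∃ i < cs.length, PySem.Chars.startswith (cs.drop i) p = true := by
  rw [PySem.Chars.isIn_iff_infix]
  constructor
  · intro h
    obtain ⟨j, hj⟩ := (PySem.Chars.exists_prefix_drop_iff_isIn p cs).2
      ((PySem.Chars.isIn_iff_infix p cs).2 h)
    refine ⟨j, ?_, (PySem.Chars.startswith_iff _ _).2 hj⟩
    by_contra hlen
    have : cs.drop j = [] := List.drop_eq_nil_of_le (by omega)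
    rw [this] at hj
    exact hp (List.prefix_nil.mp hj)
  · rintro ⟨i, _, hsw⟩
    exact (PySem.Chars.isIn_iff_infix p cs).1
      ((PySem.Chars.exists_prefix_drop_iff_isIn p cs).1
        ⟨i, (PySem.Chars.startswith_iff _ _).1 hsw⟩)

-- Every pattern in the skip list is nonempty.
theorem skipPatterns_ne_nil : ∀ p ∈ skipPatternsA, p.toList ≠ [] := by decide

-- The two scans agree: some pattern occurs in cs iff some pattern starts at some index < cs.length.
theorem scans_agree (cs : List Char) :
    skipPatternsA.any (fun pattern => PySem.Chars.isIn pattern.toList cs) =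
    (List.range cs.length).any (fun i =>
      skipPatternsA.any (fun p => PySem.Chars.startswith (cs.drop i) p.toList)) := by
  rw [Bool.eq_iff_iff]
  simp only [List.any_eq_true, List.mem_range]
  constructor
  · rintro ⟨p, hp, hin⟩
    obtain ⟨i, hi, hsw⟩ :=
      (isIn_iff_exists_startswith p.toList cs (skipPatterns_ne_nil p hp)).1 hin
    exact ⟨i, hi, p, hp, hsw⟩
  · rintro ⟨i, hi, p, hp, hsw⟩
    exact ⟨p, hp,
      (isIn_iff_exists_startswith p.toList cs (skipPatterns_ne_nil p hp)).2 ⟨i, hi, hsw⟩⟩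

-- ===== VERDICT (by name: the statement is the Claim_ definition above) =====
theorem is_doc_page_spec : Claim_equal_is_doc_page := by
  intro url _
  unfold Spec_is_doc_page is_doc_page is_doc_page_alt
  simp only [PySem.Str.isIn]
  rw [scans_agree]
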